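-- pv_equiv track=rewrite | github.com/robertoBosio/nn2FPGA | nn2fpga/compiler/transforms/slices_to_split_tree.py | _is_full_tiling
-- ===== SOURCE A (Python) =====
-- def _is_full_tiling(intervals, dim: int) -> bool:
--     """
--     intervals: list of (start, end, slice_node) sorted by start
--     Checks they tile [0..dim) contiguously with no gaps/overlaps.
--     """
--     if not intervals:
--         return False
--     if intervals[0][0] != 0:
--         return False
--     prev_end = intervals[0][1]
--     for (st, en, _) in intervals[1:]:
--         if st != prev_end:
--             return False
--         prev_end = en
--     return prev_end == dim
-- ===== SOURCE B (Python) =====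
-- def _is_full_tiling(intervals, dim: int) -> bool:
--     if not intervals:
--         return False
--     starts = [iv[0] for iv in intervals]
--     ends = [iv[1] for iv in intervals]
--     return starts[0] == 0 and ends[-1] == dim and starts[1:] == ends[:-1]
-- ===== Notes on version B (the rewrite author's own statement) =====
-- stated objective: idiomatic
-- what changed: Replaces the stateful prev_end scan with two projection lists (starts, ends) and expresses the tiling condition as boundary checks plus one slice equality starts[1:] == ends[:-1].
import Mathlib
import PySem

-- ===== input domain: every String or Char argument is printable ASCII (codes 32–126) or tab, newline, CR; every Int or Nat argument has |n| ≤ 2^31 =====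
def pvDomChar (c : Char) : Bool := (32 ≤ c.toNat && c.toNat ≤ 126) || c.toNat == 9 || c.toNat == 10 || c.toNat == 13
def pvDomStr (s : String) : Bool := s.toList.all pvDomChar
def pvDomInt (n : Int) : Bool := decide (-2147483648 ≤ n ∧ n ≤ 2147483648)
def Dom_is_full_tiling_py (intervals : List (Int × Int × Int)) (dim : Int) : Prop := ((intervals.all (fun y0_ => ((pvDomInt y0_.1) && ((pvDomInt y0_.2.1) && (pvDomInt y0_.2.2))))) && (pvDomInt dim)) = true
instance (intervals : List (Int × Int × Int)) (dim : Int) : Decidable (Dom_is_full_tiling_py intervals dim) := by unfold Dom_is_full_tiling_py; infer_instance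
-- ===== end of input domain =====

-- B replaces A's stateful prev_end scan by two projection lists and one slice
-- equality (starts[1:] == ends[:-1]); objective: idiomatic. Same O(n) cost.

-- ===== PORT A =====
-- the 'for (st, en, _) in intervals[1:]' loop carrying prev_end, with early return
def tileLoop : List (Int × Int × Int) → Int → Int → Bool
  | [], prev_end, dim => prev_end == dim
  | (st, en, _) :: rest, prev_end, dim =>
      if st != prev_end then false else tileLoop rest en dim

def is_full_tiling_py (intervals : List (Int × Int × Int)) (dim : Int) : Bool :=
  match intervals with
  | [] => false
  | (s0, e0, _) :: rest =>
      if s0 != 0 then false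
      else tileLoop rest e0 dim

-- ===== PORT B =====
def is_full_tiling_py_alt (intervals : List (Int × Int × Int)) (dim : Int) : Bool :=
  if intervals.isEmpty then false
  else
    let starts := intervals.map (fun iv => iv.1)
    let ends := intervals.map (fun iv => iv.2.1)
    -- starts[0], ends[-1], starts[1:], ends[:-1] ported with PySem (exact)
    (PySem.List.pyGet? starts 0 == some 0) &&
    (PySem.List.pyGet? ends (-1) == some dim) &&
    (PySem.List.slice starts (some 1) none == PySem.List.slice ends none (some (-1)))

-- ===== PRECONDITION & SPEC =====
def Spec_is_full_tiling_py (intervals : List (Int × Int × Int)) (dim : Int) (out : Bool) : Prop := out = is_full_tiling_py_alt intervals dim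
instance (intervals : List (Int × Int × Int)) (dim : Int) (out : Bool) : Decidable (Spec_is_full_tiling_py intervals dim out) := by unfold Spec_is_full_tiling_py; infer_instance

-- ===== CLAIM =====
def Claim_equal_is_full_tiling_py : Prop := ∀ (intervals : List (Int × Int × Int)) (dim : Int), Dom_is_full_tiling_py intervals dim → Spec_is_full_tiling_py intervals dim (is_full_tiling_py intervals dim)

-- ===== LEMMAS AND PROOFS =====
-- A's loop computes exactly "the last end equals dim, and each start equals the
-- previous end" — the getLast?/dropLast form that B's slice comparison checks.
theorem tileLoop_eq (rest : List (Int × Int × Int)) (e dim : Int) :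
    tileLoop rest e dim =
      (((e :: rest.map (fun iv => iv.2.1)).getLast? == some dim) &&
       (rest.map (fun iv => iv.1) == (e :: rest.map (fun iv => iv.2.1)).dropLast)) := by
  induction rest generalizing e with
  | nil => simp [tileLoop]
  | cons hd tl ih =>
    obtain ⟨st, en, sl⟩ := hd
    simp only [tileLoop, List.map_cons]
    by_cases h : st = e
    · subst h
      rw [ih en]
      cases tl with
      | nil => simp
      | cons x xs =>
        simp only [List.map_cons, List.getLast?_cons_cons, List.dropLast_cons₂,
          List.cons_beq_cons]
        cases hh : ((st :: (x :: xs).map (fun iv => iv.2.1)).getLast? == some dim) <;>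
          simp_all [Bool.and_comm, Bool.and_assoc]
    · cases tl <;> simp [List.cons_beq_cons, h]

theorem is_full_tiling_py_spec : Claim_equal_is_full_tiling_py := by
  unfold Claim_equal_is_full_tiling_py
  intro intervals dim _
  unfold Spec_is_full_tiling_py
  cases intervals with
  | nil => rfl
  | cons hd rest =>
    obtain ⟨s0, e0, sl⟩ := hd
    simp only [is_full_tiling_py, is_full_tiling_py_alt, List.isEmpty_cons, List.map_cons,
      PySem.List.pyGet?_zero_cons, PySem.List.pyGet?_neg_one,
      PySem.List.slice_from_one, PySem.List.slice_to_neg_one, List.tail_cons]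
    by_cases h : s0 = 0
    · subst h
      simp [tileLoop_eq]
    · simp [h]
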